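-- pv_equiv track=rewrite | github.com/GalGilad/TAU | tau.py | selection_helper_get_batch_of_pairs
-- ===== SOURCE A (Python) =====
-- import itertools
--
-- def selection_helper_get_batch_of_pairs(elite_indices, candidate_idx, batch_size, computed=None):
--     pairs = list(itertools.product(elite_indices, [candidate_idx]))
--     pairs = [pair for pair in pairs if pair not in computed] if computed is not None else pairs
--     batch_overflow = False if len(pairs) < batch_size else True
--     i = 1
--     while not batch_overflow:
--         pairs += list(itertools.product(elite_indices, [candidate_idx+i]))
--         for j in range(i):
--             pairs.append((candidate_idx+j, candidate_idx+i))
--         batch_overflow = False if len(pairs) < batch_size else True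
--         i += 1
--     return pairs[:batch_size]
-- ===== SOURCE B (Python) =====
-- def selection_helper_get_batch_of_pairs(elite_indices, candidate_idx, batch_size, computed=None):
--     n = max(batch_size, 0)
--     first = [(e, candidate_idx) for e in elite_indices
--              if computed is None or (e, candidate_idx) not in computed]
--     if n <= len(first):
--         return first[:n]
--     m = len(elite_indices)
--     # map each remaining 0-based tail position r directly to its pair by block
--     # arithmetic: block i holds m + i pairs and starts at offset 'base'; the
--     # (j, base) pointer only moves forward, so the whole construction is O(n)
--     tail = []
--     j, base = 0, 0          # current block is i = j + 1, starting at offset base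
--     for r in range(n - len(first)):
--         while r >= base + m + j + 1:
--             base += m + j + 1
--             j += 1
--         p = r - base
--         tail.append((elite_indices[p], candidate_idx + j + 1) if p < m
--                     else (candidate_idx + (p - m), candidate_idx + j + 1))
--     return first + tail
-- ===== Notes on version B (the rewrite author's own statement) =====
-- stated objective: alternative
-- what changed: B replaces A's grow-a-list-until-overflow-then-slice loop by direct random-access construction: it returns the filtered first block (truncated) and computes each remaining output position's pair individually by skipping whole blocks arithmetically (block i holds m+i pairs), never building or slicing an overshooting list.
-- intended difference: When batch_size is negative and the filtered first block has more than -batch_size pairs, A's final pairs[:batch_size] slice accidentally returns the block with its last -batch_size pairs dropped, while B returns the empty batch, which is the intended result of requesting a non-positive number of pairs. — e.g. on selection_helper_get_batch_of_pairs([1, 2], 0, -1, none): A returns [(1, 0)], B returns []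
import Mathlib
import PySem

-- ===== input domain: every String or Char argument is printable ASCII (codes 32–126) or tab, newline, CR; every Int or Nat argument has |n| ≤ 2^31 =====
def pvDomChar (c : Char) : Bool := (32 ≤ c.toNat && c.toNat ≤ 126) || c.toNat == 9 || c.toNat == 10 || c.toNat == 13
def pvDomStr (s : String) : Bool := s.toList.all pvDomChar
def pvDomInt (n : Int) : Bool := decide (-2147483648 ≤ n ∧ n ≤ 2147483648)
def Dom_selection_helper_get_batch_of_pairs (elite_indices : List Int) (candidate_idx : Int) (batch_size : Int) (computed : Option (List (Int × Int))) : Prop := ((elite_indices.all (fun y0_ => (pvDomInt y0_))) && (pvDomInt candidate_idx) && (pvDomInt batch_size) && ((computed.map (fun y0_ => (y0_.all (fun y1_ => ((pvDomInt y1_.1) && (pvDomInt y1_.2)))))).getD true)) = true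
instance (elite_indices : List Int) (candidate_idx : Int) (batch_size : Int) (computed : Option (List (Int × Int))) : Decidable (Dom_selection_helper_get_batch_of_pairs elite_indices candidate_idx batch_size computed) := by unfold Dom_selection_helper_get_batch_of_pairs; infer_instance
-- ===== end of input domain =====

-- B builds the batch by random access — each tail position is mapped to its pair by
-- block arithmetic — instead of A's grow-until-overflow accumulation and final slice.

-- ===== PORT A =====
-- A line 2: keep only pairs not already in 'computed' (when given)
def selAfilter (computed : Option (List (Int × Int))) (pairs : List (Int × Int)) : List (Int × Int) :=
  match computed with
  | some c => pairs.filter (fun pair => decide (pair ∉ c))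
  | none => pairs

-- the while-loop of A: append block i (elite×{cand+i} then the (cand+j,cand+i) pairs), recheck overflow
def selAloop (elite : List Int) (cand : Int) (b : Int) (pairs : List (Int × Int)) (i : Nat) (hi : 1 ≤ i) : List (Int × Int) :=
  if h : (pairs.length : Int) < b then
    selAloop elite cand b
      (pairs ++ elite.map (fun e => (e, cand + (i : Int)))
             ++ (List.range i).map (fun (j : Nat) => (cand + (j : Int), cand + (i : Int))))
      (i + 1) (by omega)
  else pairs
termination_by (b - pairs.length).toNat
decreasing_by
  simp
  omega

def selection_helper_get_batch_of_pairs (elite_indices : List Int) (candidate_idx : Int) (batch_size : Int) (computed : Option (List (Int × Int))) : List (Int × Int) :=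
  PySem.List.slice
    (selAloop elite_indices candidate_idx batch_size
      (selAfilter computed (elite_indices.map (fun e => (e, candidate_idx)))) 1 (le_refl 1))
    none (some batch_size)

-- ===== PORT B =====
-- B's 'first' comprehension: (e, cand) for e in elite, filtered by 'computed'
def selBfirst (elite : List Int) (cand : Int) (computed : Option (List (Int × Int))) : List (Int × Int) :=
  elite.filterMap (fun e =>
    match computed with
    | none => some (e, cand)
    | some c => if (e, cand) ∈ c then none else some (e, cand))

-- B's inner while: advance the (j, base) block pointer until position r falls in
-- block i = j + 1, which starts at offset base and holds m + j + 1 pairs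
def selBskip (m : Nat) (r : Nat) (j : Nat) (base : Nat) : Nat × Nat :=
  if h : base + m + j + 1 ≤ r then selBskip m r (j + 1) (base + m + j + 1) else (j, base)
termination_by r - base
decreasing_by omega

-- one iteration of B's for-loop: skip to r's block, append r's pair
def selBbody (elite : List Int) (m : Nat) (cand : Int)
    (st : (Nat × Nat) × List (Int × Int)) (r : Nat) : (Nat × Nat) × List (Int × Int) :=
  let s := selBskip m r st.1.1 st.1.2
  let p := r - s.2
  ((s.1, s.2),
   st.2 ++ [if p < m then (elite.getD p 0, cand + (s.1 : Int) + 1)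
            else (cand + ((p - m : Nat) : Int), cand + (s.1 : Int) + 1)])

def selection_helper_get_batch_of_pairs_alt (elite_indices : List Int) (candidate_idx : Int) (batch_size : Int) (computed : Option (List (Int × Int))) : List (Int × Int) :=
  let n := (max batch_size 0).toNat
  let first := selBfirst elite_indices candidate_idx computed
  if n ≤ first.length then first.take n
  else first ++ ((List.range (n - first.length)).foldl
        (selBbody elite_indices elite_indices.length candidate_idx) ((0, 0), [])).2

-- ===== PRECONDITION & SPEC =====
-- When batch_size < 0 and the filtered first block holds more than -batch_size pairs, A's
-- final pairs[:batch_size] slice accidentally returns that block minus its last -batch_size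
-- pairs, while B returns [] — the intended result of requesting a non-positive batch.
def D_selection_helper_get_batch_of_pairs (elite_indices : List Int) (candidate_idx : Int) (batch_size : Int) (computed : Option (List (Int × Int))) : Prop :=
  batch_size < 0 ∧
  -batch_size < ((elite_indices.countP
      (fun e => decide ((e, candidate_idx) ∉ computed.getD []))) : Int)
instance (elite_indices : List Int) (candidate_idx : Int) (batch_size : Int) (computed : Option (List (Int × Int))) : Decidable (D_selection_helper_get_batch_of_pairs elite_indices candidate_idx batch_size computed) := by unfold D_selection_helper_get_batch_of_pairs; infer_instance

def Spec_selection_helper_get_batch_of_pairs (elite_indices : List Int) (candidate_idx : Int) (batch_size : Int) (computed : Option (List (Int × Int))) (out : List (Int × Int)) : Prop := ¬ D_selection_helper_get_batch_of_pairs elite_indices candidate_idx batch_size computed → out = selection_helper_get_batch_of_pairs_alt elite_indices candidate_idx batch_size computed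
instance (elite_indices : List Int) (candidate_idx : Int) (batch_size : Int) (computed : Option (List (Int × Int))) (out : List (Int × Int)) : Decidable (Spec_selection_helper_get_batch_of_pairs elite_indices candidate_idx batch_size computed out) := by unfold Spec_selection_helper_get_batch_of_pairs; infer_instance

def pvDiffWitness_selection_helper_get_batch_of_pairs : List Int × Int × Int × (Option (List (Int × Int))) := ([1, 2], 0, -1, none)
def pvDiffWitnessOut_selection_helper_get_batch_of_pairs : (List (Int × Int)) × (List (Int × Int)) := ([(1, 0)], [])

-- ===== CLAIM (what is proved, stated in full; the proofs are below) =====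
def Claim_unchanged_selection_helper_get_batch_of_pairs : Prop := ∀ (elite_indices : List Int) (candidate_idx : Int) (batch_size : Int) (computed : Option (List (Int × Int))), Dom_selection_helper_get_batch_of_pairs elite_indices candidate_idx batch_size computed → Spec_selection_helper_get_batch_of_pairs elite_indices candidate_idx batch_size computed (selection_helper_get_batch_of_pairs elite_indices candidate_idx batch_size computed)
def Claim_changed_selection_helper_get_batch_of_pairs : Prop := Dom_selection_helper_get_batch_of_pairs (pvDiffWitness_selection_helper_get_batch_of_pairs.1) (pvDiffWitness_selection_helper_get_batch_of_pairs.2.1) (pvDiffWitness_selection_helper_get_batch_of_pairs.2.2.1) (pvDiffWitness_selection_helper_get_batch_of_pairs.2.2.2) ∧ D_selection_helper_get_batch_of_pairs (pvDiffWitness_selection_helper_get_batch_of_pairs.1) (pvDiffWitness_selection_helper_get_batch_of_pairs.2.1) (pvDiffWitness_selection_helper_get_batch_of_pairs.2.2.1) (pvDiffWitness_selection_helper_get_batch_of_pairs.2.2.2) ∧ selection_helper_get_batch_of_pairs (pvDiffWitness_selection_helper_get_batch_of_pairs.1) (pvDiffWitness_selection_helper_get_batch_of_pairs.2.1) (pvDiffWitness_selection_helper_get_batch_of_pairs.2.2.1)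 (pvDiffWitness_selection_helper_get_batch_of_pairs.2.2.2) = pvDiffWitnessOut_selection_helper_get_batch_of_pairs.1 ∧ selection_helper_get_batch_of_pairs_alt (pvDiffWitness_selection_helper_get_batch_of_pairs.1) (pvDiffWitness_selection_helper_get_batch_of_pairs.2.1) (pvDiffWitness_selection_helper_get_batch_of_pairs.2.2.1) (pvDiffWitness_selection_helper_get_batch_of_pairs.2.2.2) = pvDiffWitnessOut_selection_helper_get_batch_of_pairs.2 ∧ pvDiffWitnessOut_selection_helper_get_batch_of_pairs.1 ≠ pvDiffWitnessOut_selection_helper_get_batch_of_pairs.2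
def Claim_exact_selection_helper_get_batch_of_pairs : Prop := ∀ (elite_indices : List Int) (candidate_idx : Int) (batch_size : Int) (computed : Option (List (Int × Int))), Dom_selection_helper_get_batch_of_pairs elite_indices candidate_idx batch_size computed → D_selection_helper_get_batch_of_pairs elite_indices candidate_idx batch_size computed → selection_helper_get_batch_of_pairs elite_indices candidate_idx batch_size computed ≠ selection_helper_get_batch_of_pairs_alt elite_indices candidate_idx batch_size computed

-- ===== LEMMAS AND PROOFS =====

-- abbreviation used only by the proofs: the i-th block of the stream A appends
def selBlock (elite : List Int) (cand : Int) (i : Nat) : List (Int × Int) :=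
  elite.map (fun e => (e, cand + (i : Int)))
  ++ (List.range i).map (fun (j : Nat) => (cand + (j : Int), cand + (i : Int)))

lemma selBlock_len (elite : List Int) (cand : Int) (i : Nat) :
    (selBlock elite cand i).length = elite.length + i := by
  simp [selBlock]

-- proof-side stream view of the tail (B's port never computes this; it is the bridge to A)
def selBloop (elite : List Int) (cand : Int) (need : Nat) (i : Nat) (hi : 1 ≤ i) : List (Int × Int) :=
  if h : need = 0 then []
  else (selBlock elite cand i).take need
    ++ selBloop elite cand (need - (selBlock elite cand i).length) (i + 1) (by omega)
termination_by need
decreasing_by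
  rw [selBlock_len]
  omega

lemma selBloop_zero (elite : List Int) (cand : Int) (i : Nat) (hi : 1 ≤ i) :
    selBloop elite cand 0 i hi = [] := by
  rw [selBloop.eq_def]; simp

-- both first blocks are the same filtered map
lemma selBfirst_eq (elite : List Int) (cand : Int) (computed : Option (List (Int × Int))) :
    selBfirst elite cand computed
      = (elite.filter (fun e =>
          match computed with
          | none => true
          | some c => decide ((e, cand) ∉ c))).map (fun e => (e, cand)) := by
  induction elite with
  | nil => cases computed <;> rfl
  | cons x xs ih =>
    cases computed with
    | none => simp [selBfirst]
    | some c =>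
      simp only [selBfirst, List.filterMap_cons, List.filter_cons] at *
      by_cases hx : (x, cand) ∈ c <;> simp [hx, ih]

lemma selAfirst_eq (elite : List Int) (cand : Int) (computed : Option (List (Int × Int))) :
    selAfilter computed (elite.map (fun e => (e, cand))) = selBfirst elite cand computed := by
  rw [selBfirst_eq]
  cases computed with
  | none => simp [selAfilter]
  | some c =>
    show (elite.map (fun e => (e, cand))).filter (fun pair => decide (pair ∉ c)) = _
    rw [List.filter_map]
    rfl

-- A's loop stops only once it holds at least batch_size pairs
lemma selAloop_len (elite : List Int) (cand : Int) (b : Int) :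
    ∀ (pairs : List (Int × Int)) (i : Nat) (hi : 1 ≤ i),
      b ≤ ((selAloop elite cand b pairs i hi).length : Int) := by
  intro pairs i hi
  induction pairs, i, hi using selAloop.induct elite cand b with
  | case1 pairs i hi h ih =>
    rw [selAloop.eq_def]; simp only [h, dite_true]
    simp only [List.map_subtype, List.unattach_attach] at ih
    exact ih
  | case2 pairs i hi h => rw [selAloop.eq_def]; simp only [h, dite_false]; omega

-- simulation: the first n items of A's loop result are pairs.take n followed by the tail stream
lemma selAloop_take (elite : List Int) (cand : Int) (b : Int) :
    ∀ (pairs : List (Int × Int)) (i : Nat) (hi : 1 ≤ i),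
      (selAloop elite cand b pairs i hi).take (max b 0).toNat
        = pairs.take (max b 0).toNat
          ++ selBloop elite cand ((max b 0).toNat - pairs.length) i hi := by
  intro pairs i hi
  induction pairs, i, hi using selAloop.induct elite cand b with
  | case2 pairs i hi h =>
    rw [selAloop.eq_def]; simp only [h, dite_false]
    have hn : (max b 0).toNat - pairs.length = 0 := by omega
    rw [hn, selBloop_zero, List.append_nil]
  | case1 pairs i hi h ih =>
    rw [selAloop.eq_def]; simp only [h, dite_true]
    simp only [List.map_subtype, List.unattach_attach] at ih
    rw [show pairs ++ elite.map (fun e => (e, cand + (i : Int)))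
          ++ (List.range i).map (fun (j : Nat) => (cand + (j : Int), cand + (i : Int)))
        = pairs ++ selBlock elite cand i from by simp [selBlock]] at ih ⊢
    rw [ih, List.take_append]
    have hlen : pairs.length < (max b 0).toNat := by omega
    conv_rhs => rw [selBloop.eq_def]
    simp only [show ¬((max b 0).toNat - pairs.length = 0) from by omega, dite_false]
    simp only [List.append_assoc, List.length_append, Nat.sub_sub]

-- b < 0 makes A's loop exit immediately
lemma selAloop_neg (elite : List Int) (cand : Int) (b : Int) (hb : b < 0)
    (pairs : List (Int × Int)) (i : Nat) (hi : 1 ≤ i) :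
    selAloop elite cand b pairs i hi = pairs := by
  rw [selAloop.eq_def]
  have h0 : (0 : Int) ≤ pairs.length := Int.natCast_nonneg _
  have : ¬ ((pairs.length : Int) < b) := by omega
  simp [this]

-- the length of the shared first block is the count D_ talks about
lemma selBfirst_len (elite : List Int) (cand : Int) (computed : Option (List (Int × Int))) :
    (selBfirst elite cand computed).length
      = elite.countP (fun e => decide ((e, cand) ∉ computed.getD [])) := by
  rw [selBfirst_eq, List.length_map, ← List.countP_eq_length_filter]
  cases computed with
  | none => simp
  | some c => rfl

-- proof-side index map: element r of the tail stream, restarting from block i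
def selBnth (elite : List Int) (m : Nat) (cand : Int) (r : Nat) (i : Nat) (hi : 1 ≤ i) : Int × Int :=
  if h : m + i ≤ r then selBnth elite m cand (r - (m + i)) (i + 1) (by omega)
  else if r < m then (elite.getD r 0, cand + (i : Int))
  else (cand + ((r - m : Nat) : Int), cand + (i : Int))
termination_by r
decreasing_by omega

-- selBnth hits element r of block i when r is inside block i
lemma selBnth_lt (elite : List Int) (cand : Int) (r i : Nat) (hi : 1 ≤ i)
    (hr : r < elite.length + i) :
    selBnth elite elite.length cand r i hi = ((selBlock elite cand i)[r]?).getD (0, 0) := by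
  rw [selBnth.eq_def]
  have h1 : ¬ (elite.length + i ≤ r) := by omega
  simp only [h1, dite_false]
  by_cases h2 : r < elite.length
  · simp only [h2, if_true]
    unfold selBlock
    rw [List.getElem?_append_left (by simpa using h2),
        List.getElem?_map, List.getElem?_eq_getElem h2]
    simp [List.getD, List.getElem?_eq_getElem h2]
  · have h3 : elite.length ≤ r := by omega
    have h4 : r - elite.length < i := by omega
    simp only [h2, if_false]
    unfold selBlock
    rw [List.getElem?_append_right (by simpa using h3)]
    simp only [List.length_map]
    rw [List.getElem?_map, List.getElem?_range h4]
    rfl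

-- one unfolding step: indexing with base i = block i (truncated) then indexing with base i+1
lemma selBnth_step (elite : List Int) (cand : Int) (k i : Nat) (hi : 1 ≤ i) :
    (List.range k).map (fun r => selBnth elite elite.length cand r i hi)
      = (selBlock elite cand i).take k
        ++ (List.range (k - (elite.length + i))).map
             (fun r => selBnth elite elite.length cand r (i + 1) (by omega)) := by
  by_cases hk : k ≤ elite.length + i
  · have h0 : k - (elite.length + i) = 0 := by omega
    rw [h0]
    simp only [List.range_zero, List.map_nil, List.append_nil]
    apply List.ext_getElem
    · simp [selBlock_len]; omega
    · intro j h1 h2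
      simp only [List.getElem_map, List.getElem_range, List.getElem_take]
      have hj : j < k := by simpa using h1
      rw [selBnth_lt elite cand j i hi (by omega)]
      have hjb : j < (selBlock elite cand i).length := by rw [selBlock_len]; omega
      simp [List.getElem?_eq_getElem hjb]
  · have hsplit : k = (elite.length + i) + (k - (elite.length + i)) := by omega
    rw [hsplit, List.range_add, List.map_append, List.map_map]
    congr 1
    · rw [List.take_of_length_le (by rw [selBlock_len]; omega)]
      apply List.ext_getElem
      · simp [selBlock_len]
      · intro j h1 h2
        simp only [List.getElem_map, List.getElem_range]
        have hjk : j < elite.length + i := by simpa using h1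
        rw [selBnth_lt elite cand j i hi hjk]
        have hjb : j < (selBlock elite cand i).length := by rw [selBlock_len]; omega
        simp [List.getElem?_eq_getElem hjb]
    · rw [Nat.add_sub_cancel_left]
      apply List.map_congr_left
      intro r _
      show selBnth elite elite.length cand (elite.length + i + r) i hi = _
      rw [selBnth.eq_def]
      have : elite.length + i ≤ elite.length + i + r := by omega
      simp only [this, dite_true]
      congr 1
      omega

-- B's index map enumerates exactly the tail stream
lemma selBnth_range (elite : List Int) (cand : Int) :
    ∀ (k i : Nat) (hi : 1 ≤ i),
      (List.range k).map (fun r => selBnth elite elite.length cand r i hi)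
        = selBloop elite cand k i hi := by
  intro k i hi
  induction k, i, hi using selBloop.induct elite cand with
  | case1 i hi => simp [selBloop_zero]
  | case2 k i hi h ih =>
    rw [selBnth_step, selBloop.eq_def]
    simp only [h, dite_false]
    rw [selBlock_len] at ih ⊢
    rw [ih]

-- the block pointer never moves past r
lemma selBskip_le (m : Nat) : ∀ (r j base : Nat), base ≤ r → (selBskip m r j base).2 ≤ r := by
  intro r j base hbr
  induction j, base using selBskip.induct m r with
  | case1 j base h ih => rw [selBskip.eq_def]; simp only [h, dite_true]; exact ih (by omega)
  | case2 j base h => rw [selBskip.eq_def]; simp only [h, dite_false]; exact hbr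

-- skipping then reading the block directly is restarting the index map at (j+1, base)
lemma selBskip_eval (elite : List Int) (cand : Int) :
    ∀ (r j base : Nat), base ≤ r →
      selBnth elite elite.length cand (r - base) (j + 1) (Nat.le_add_left 1 j)
        = (if r - (selBskip elite.length r j base).2 < elite.length then
             (elite.getD (r - (selBskip elite.length r j base).2) 0,
              cand + ((selBskip elite.length r j base).1 : Int) + 1)
           else
             (cand + ((r - (selBskip elite.length r j base).2 - elite.length : Nat) : Int),
              cand + ((selBskip elite.length r j base).1 : Int) + 1)) := by
  intro r j base hbr
  induction j, base using selBskip.induct elite.length r with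
  | case1 j base h ih =>
    rw [selBskip.eq_def]
    simp only [h, dite_true]
    rw [selBnth.eq_def]
    have hc : elite.length + (j + 1) ≤ r - base := by omega
    simp only [hc, dite_true]
    rw [show r - base - (elite.length + (j + 1)) = r - (base + elite.length + j + 1) by omega]
    exact ih (by omega)
  | case2 j base h =>
    rw [selBskip.eq_def]
    simp only [h, dite_false]
    rw [selBnth.eq_def]
    have hc : ¬ (elite.length + (j + 1) ≤ r - base) := by omega
    simp only [hc, dite_false]
    by_cases hp : r - base < elite.length <;>
      simp [hp, Nat.cast_add, add_assoc]

-- the pointer state (j, base) stays a faithful restart point of the index map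
def selInv (elite : List Int) (cand : Int) (j base : Nat) : Prop :=
  ∀ x, base ≤ x →
    selBnth elite elite.length cand (x - base) (j + 1) (Nat.le_add_left 1 j)
      = selBnth elite elite.length cand x 1 (le_refl 1)

lemma selBskip_inv (elite : List Int) (cand : Int) :
    ∀ (r j base : Nat), base ≤ r → selInv elite cand j base →
      selInv elite cand (selBskip elite.length r j base).1 (selBskip elite.length r j base).2 := by
  intro r j base hbr hinv
  induction j, base using selBskip.induct elite.length r with
  | case1 j base h ih =>
    rw [selBskip.eq_def]
    simp only [h, dite_true]
    refine ih (by omega) ?_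
    intro x hx
    rw [← hinv x (by omega)]
    conv_rhs => rw [selBnth.eq_def]
    have hc : elite.length + (j + 1) ≤ x - base := by omega
    simp only [hc, dite_true]
    rw [show x - base - (elite.length + (j + 1)) = x - (base + elite.length + j + 1) by omega]
  | case2 j base h =>
    rw [selBskip.eq_def]
    simp only [h, dite_false]
    exact hinv

-- B's for-loop enumerates the stream: the fold emits exactly the index-map values
lemma fold_tail (elite : List Int) (cand : Int) :
    ∀ (k r0 j base : Nat) (acc : List (Int × Int)), base ≤ r0 → selInv elite cand j base →
      ((List.range' r0 k).foldl (selBbody elite elite.length cand) ((j, base), acc)).2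
        = acc ++ (List.range' r0 k).map
            (fun r => selBnth elite elite.length cand r 1 (le_refl 1)) := by
  intro k
  induction k with
  | zero => intro r0 j base acc _ _; simp
  | succ k ih =>
    intro r0 j base acc hbr hinv
    rw [List.range'_succ, List.foldl_cons, List.map_cons]
    have hpair : (selBbody elite elite.length cand ((j, base), acc) r0).2
        = acc ++ [selBnth elite elite.length cand r0 1 (le_refl 1)] := by
      show acc ++ [_] = _
      rw [← hinv r0 hbr, selBskip_eval elite cand r0 j base hbr]
    have hst1 : (selBbody elite elite.length cand ((j, base), acc) r0).1
        = ((selBskip elite.length r0 j base).1, (selBskip elite.length r0 j base).2) := rfl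
    have hb' := selBskip_le elite.length r0 j base hbr
    have hinv' := selBskip_inv elite cand r0 j base hbr hinv
    calc ((List.range' (r0+1) k).foldl (selBbody elite elite.length cand)
            (selBbody elite elite.length cand ((j, base), acc) r0)).2
        = ((List.range' (r0+1) k).foldl (selBbody elite elite.length cand)
            (((selBskip elite.length r0 j base).1, (selBskip elite.length r0 j base).2),
             acc ++ [selBnth elite elite.length cand r0 1 (le_refl 1)])).2 := by
          rw [← hst1, ← hpair]
      _ = acc ++ selBnth elite elite.length cand r0 1 (le_refl 1)
            :: (List.range' (r0+1) k).map
                 (fun r => selBnth elite elite.length cand r 1 (le_refl 1)) := by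
          rw [ih (r0+1) _ _ _ (by omega) hinv']
          simp

-- B in stream form: the first block truncated, then the tail stream
lemma alt_eq (elite : List Int) (cand : Int) (b : Int) (computed : Option (List (Int × Int))) :
    selection_helper_get_batch_of_pairs_alt elite cand b computed
      = (selBfirst elite cand computed).take (max b 0).toNat
        ++ selBloop elite cand ((max b 0).toNat - (selBfirst elite cand computed).length)
            1 (le_refl 1) := by
  unfold selection_helper_get_batch_of_pairs_alt
  by_cases h : (max b 0).toNat ≤ (selBfirst elite cand computed).length
  · simp only [h, if_true]
    have h0 : (max b 0).toNat - (selBfirst elite cand computed).length = 0 := by omega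
    rw [h0, selBloop_zero, List.append_nil]
  · simp only [h, if_false]
    rw [List.take_of_length_le (by omega)]
    rw [List.range_eq_range', fold_tail elite cand _ 0 0 0 [] (le_refl 0)
          (fun x _ => by rw [Nat.sub_zero]), List.nil_append, ← List.range_eq_range',
        selBnth_range]

lemma alt_nonpos (elite : List Int) (cand : Int) (b : Int) (hb : b ≤ 0)
    (computed : Option (List (Int × Int))) :
    selection_helper_get_batch_of_pairs_alt elite cand b computed = [] := by
  rw [alt_eq]
  have hmax : (max b 0).toNat = 0 := by omega
  rw [hmax, Nat.zero_sub, selBloop_zero]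
  simp

lemma unchanged_main (elite_indices : List Int) (candidate_idx : Int) (batch_size : Int)
    (computed : Option (List (Int × Int)))
    (hD : ¬ D_selection_helper_get_batch_of_pairs elite_indices candidate_idx batch_size computed) :
    selection_helper_get_batch_of_pairs elite_indices candidate_idx batch_size computed
      = selection_helper_get_batch_of_pairs_alt elite_indices candidate_idx batch_size computed := by
  unfold selection_helper_get_batch_of_pairs
  rw [selAfirst_eq, alt_eq]
  by_cases hb : 0 ≤ batch_size
  · -- nonnegative batch_size: the slice is a take of the first n stream items
    have hlen := selAloop_len elite_indices candidate_idx batch_size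
      (selBfirst elite_indices candidate_idx computed) 1 (le_refl 1)
    rw [PySem.List.slice_to _ hb]
    have hmax : batch_size.toNat = (max batch_size 0).toNat := by omega
    rw [hmax, selAloop_take]
  · -- negative batch_size outside D_: both sides are []
    push Not at hb
    unfold D_selection_helper_get_batch_of_pairs at hD
    push Not at hD
    have hcnt := hD hb
    rw [selAloop_neg _ _ _ hb]
    have hmax : (max batch_size 0).toNat = 0 := by omega
    rw [hmax, Nat.zero_sub, selBloop_zero, List.take_zero, List.append_nil]
    have hflen : ((selBfirst elite_indices candidate_idx computed).length : Int) ≤ -batch_size := by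
      rw [selBfirst_len]; exact hcnt
    have hk : batch_size = -(((-batch_size).toNat : Nat) : Int) := by omega
    have hkpos : 0 < (-batch_size).toNat := by omega
    rw [hk, PySem.List.slice_to_neg_natCast _ _ hkpos]
    have h1 : (selBfirst elite_indices candidate_idx computed).length - (-batch_size).toNat = 0 := by
      omega
    rw [h1, List.take_zero]

-- ===== VERDICT (by name: the statement is the Claim_ definition above) =====
theorem selection_helper_get_batch_of_pairs_spec : Claim_unchanged_selection_helper_get_batch_of_pairs := by
  intro elite_indices candidate_idx batch_size computed _ hD
  exact unchanged_main elite_indices candidate_idx batch_size computed hD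

theorem selection_helper_get_batch_of_pairs_changed : Claim_changed_selection_helper_get_batch_of_pairs := by
  unfold Claim_changed_selection_helper_get_batch_of_pairs
  refine ⟨by decide, by decide, ?_, ?_, by decide⟩
  · show selection_helper_get_batch_of_pairs [1, 2] 0 (-1) none = [(1, 0)]
    unfold selection_helper_get_batch_of_pairs
    rw [selAloop_neg _ _ _ (by decide)]
    decide
  · show selection_helper_get_batch_of_pairs_alt [1, 2] 0 (-1) none = []
    exact alt_nonpos _ _ _ (by decide) _

theorem selection_helper_get_batch_of_pairs_tight : Claim_exact_selection_helper_get_batch_of_pairs := by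
  intro elite_indices candidate_idx batch_size computed _ hD
  obtain ⟨hb, hcnt⟩ := hD
  unfold selection_helper_get_batch_of_pairs
  rw [selAfirst_eq, selAloop_neg _ _ _ hb, alt_nonpos _ _ _ (le_of_lt hb)]
  have hflen : -batch_size < ((selBfirst elite_indices candidate_idx computed).length : Int) := by
    rw [selBfirst_len]; exact hcnt
  have hk : batch_size = -(((-batch_size).toNat : Nat) : Int) := by omega
  have hkpos : 0 < (-batch_size).toNat := by omega
  rw [hk, PySem.List.slice_to_neg_natCast _ _ hkpos]
  intro hcontra
  have := congrArg List.length hcontra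
  simp only [List.length_take, List.length_nil] at this
  omega
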